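-- pv_equiv track=rewrite | github.com/Jeremiah-Bergkvist/ProjectEuler | helper.py | find_recurring_sequences
-- ===== SOURCE A (Python) =====
-- def find_recurring_sequences(s):
--     length = len(s)
--     max_width = length // 2
--     matches = []
--     width = 1
--     while width <= max_width:
--         index = 0
--         while index + width < length:
--             if s[index:index+width] == s[index+width: index+width+width]:
--                 #print "[%d] (%d, %d) (%s, %s) %s == %s" % (width, index, index+width-1, index+width, index+width+width-1, s[index:index+width], s[index+width: index+width+width])
--                 matches.append(s[index:index+width])
--                 break
--             index += 1
--         width += 1
--     return matches
-- ===== SOURCE B (Python) =====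
-- def find_recurring_sequences(s):
--     n = len(s)
--     matches = []
--     for w in range(1, n // 2 + 1):
--         run = 0
--         for j in range(n - w):
--             if s[j] == s[j + w]:
--                 run += 1
--                 if run == w:
--                     matches.append(s[j - w + 1:j + 1])
--                     break
--             else:
--                 run = 0
--     return matches
-- ===== Notes on version B (the rewrite author's own statement) =====
-- stated objective: faster
-- what changed: Instead of comparing the two width-w slices from scratch at every index (O(w) per test), B keeps a running count of consecutive positions j with s[j]==s[j+w] and reports the first index where the run reaches w, making each width a single O(n) character pass.
import Mathlib
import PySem

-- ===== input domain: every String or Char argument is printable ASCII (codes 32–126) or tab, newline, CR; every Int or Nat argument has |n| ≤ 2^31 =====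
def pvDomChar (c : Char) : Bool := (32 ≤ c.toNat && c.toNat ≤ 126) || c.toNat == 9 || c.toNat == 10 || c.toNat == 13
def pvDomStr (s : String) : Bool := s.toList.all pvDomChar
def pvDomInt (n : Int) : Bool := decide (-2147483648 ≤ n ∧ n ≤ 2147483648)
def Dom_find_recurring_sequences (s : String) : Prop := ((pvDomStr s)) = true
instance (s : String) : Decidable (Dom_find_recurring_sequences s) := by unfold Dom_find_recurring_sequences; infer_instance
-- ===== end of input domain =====

-- B replaces A's per-index slice comparison by a per-width single pass that counts a run of
-- consecutive positions j with s[j] == s[j+w]; objective: faster (measured; O(n^2) vs O(n^3)).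

-- ===== PORT A =====
-- A's inner while loop: scan index upward, return the first width-w block that equals the
-- block right after it (Python slice semantics), or none when the loop runs out.
def pvA_inner (cs : List Char) (n w index : Int) : Option (List Char) :=
  if _h : index + w < n then
    if PySem.List.slice cs (some index) (some (index + w)) =
       PySem.List.slice cs (some (index + w)) (some (index + w + w)) then
      some (PySem.List.slice cs (some index) (some (index + w)))
    else pvA_inner cs n w (index + 1)
  else none
termination_by (n - w - index).toNat
decreasing_by omega

-- A's outer while loop over width = 1 .. max_width (= length // 2), appending each found block.
def pvA_outer (cs : List Char) (n maxw w : Int) (acc : List String) : List String :=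
  if _h : w ≤ maxw then
    match pvA_inner cs n w 0 with
    | some m => pvA_outer cs n maxw (w + 1) (acc ++ [String.ofList m])
    | none => pvA_outer cs n maxw (w + 1) acc
  else acc
termination_by (maxw + 1 - w).toNat
decreasing_by all_goals omega

def find_recurring_sequences (s : String) : List String :=
  pvA_outer s.toList (s.toList.length : Int) (PySem.Int.floordiv (s.toList.length : Int) 2) 1 []

-- ===== PORT B =====
-- B's inner for loop: slide j, counting the current run of positions with s[j] == s[j+w];
-- when the run reaches w, the block s[j-w+1 : j+1] is the first adjacent equal block.
def pvB_inner (cs : List Char) (n w j run : Int) : Option (List Char) :=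
  if _h : j < n - w then
    if PySem.List.pyGet? cs j = PySem.List.pyGet? cs (j + w) then
      if run + 1 = w then
        some (PySem.List.slice cs (some (j - w + 1)) (some (j + 1)))
      else pvB_inner cs n w (j + 1) (run + 1)
    else pvB_inner cs n w (j + 1) 0
  else none
termination_by (n - w - j).toNat
decreasing_by all_goals omega

def find_recurring_sequences_alt (s : String) : List String :=
  let cs := s.toList
  let n : Int := (cs.length : Int)
  (PySem.List.pyRange 1 (PySem.Int.floordiv n 2 + 1) 1).foldl
    (fun acc w =>
      match pvB_inner cs n w 0 0 with
      | some m => acc ++ [String.ofList m]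
      | none => acc) []

-- ===== PRECONDITION & SPEC =====
def Spec_find_recurring_sequences (s : String) (out : List String) : Prop := out = find_recurring_sequences_alt s
instance (s : String) (out : List String) : Decidable (Spec_find_recurring_sequences s out) := by unfold Spec_find_recurring_sequences; infer_instance

-- ===== CLAIM (what is proved, stated in full; the proofs are below) =====
def Claim_equal_find_recurring_sequences : Prop := ∀ (s : String), Dom_find_recurring_sequences s → Spec_find_recurring_sequences s (find_recurring_sequences s)

-- ===== LEMMAS AND PROOFS =====

-- Characterisation of A's slice test, in Nat form: the two adjacent width-w slices are
-- equal iff the second one fits entirely and the characters agree pointwise.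
lemma pv_take_drop_eq_iff (cs : List Char) (i w : Nat) (hw : 0 < w) (hiw : i + w < cs.length) :
    ((cs.drop i).take w = (cs.drop (i + w)).take w) ↔
      (i + w + w ≤ cs.length ∧ ∀ k < w, cs[i + k]? = cs[i + w + k]?) := by
  constructor
  · intro h
    have hlen := congrArg List.length h
    simp only [List.length_take, List.length_drop] at hlen
    have hle : i + w + w ≤ cs.length := by omega
    refine ⟨hle, ?_⟩
    intro k hk
    have h2 := congrArg (fun l => l[k]?) h
    simpa [List.getElem?_take, hk, List.getElem?_drop] using h2
  · rintro ⟨hle, hptw⟩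
    apply List.ext_getElem?
    intro k
    by_cases hk : k < w
    · simpa [List.getElem?_take, hk, List.getElem?_drop] using hptw k hk
    · simp [List.getElem?_take, hk]

-- The Int-level slice test used by port A.
def pvCond (cs : List Char) (w i : Int) : Prop :=
  PySem.List.slice cs (some i) (some (i + w)) =
  PySem.List.slice cs (some (i + w)) (some (i + w + w))

lemma pvCond_iff (cs : List Char) (w i : Int) (hw : 1 ≤ w) (hi : 0 ≤ i)
    (hiw : i + w < (cs.length : Int)) :
    pvCond cs w i ↔
      (i + w + w ≤ (cs.length : Int) ∧
        ∀ k : Int, 0 ≤ k → k < w → PySem.List.pyGet? cs (i + k) = PySem.List.pyGet? cs (i + w + k)) := by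
  unfold pvCond
  rw [PySem.List.slice_toNat cs hi (by omega), PySem.List.slice_toNat cs (by omega : (0:Int) ≤ i + w) (by omega : (0:Int) ≤ i + w + w)]
  have e1 : (i + w).toNat - i.toNat = w.toNat := by omega
  have e2 : (i + w + w).toNat - (i + w).toNat = w.toNat := by omega
  have e3 : (i + w).toNat = i.toNat + w.toNat := by omega
  rw [e1, e2, e3]
  rw [pv_take_drop_eq_iff cs i.toNat w.toNat (by omega) (by omega)]
  constructor
  · rintro ⟨hle, hptw⟩
    refine ⟨by omega, ?_⟩
    intro k hk0 hkw
    have := hptw k.toNat (by omega)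
    rw [PySem.List.pyGet?_of_nonneg cs (by omega), PySem.List.pyGet?_of_nonneg cs (by omega)]
    have e4 : (i + k).toNat = i.toNat + k.toNat := by omega
    have e5 : (i + w + k).toNat = i.toNat + w.toNat + k.toNat := by omega
    rw [e4, e5]; exact this
  · rintro ⟨hle, hptw⟩
    refine ⟨by omega, ?_⟩
    intro k hk
    have := hptw (k : Int) (by omega) (by omega)
    rw [PySem.List.pyGet?_of_nonneg cs (by omega), PySem.List.pyGet?_of_nonneg cs (by omega)] at this
    have e4 : ((i + (k:Int))).toNat = i.toNat + k := by omega
    have e5 : ((i + w + (k:Int))).toNat = i.toNat + w.toNat + k := by omega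
    rw [e4, e5] at this; exact this

-- If the test fails on [a, b) (and the loop keeps running there), A's scan may start at b.
lemma pvA_skip (cs : List Char) (n w a b : Int) (hab : a ≤ b)
    (hstep : ∀ i, a ≤ i → i < b → i + w < n)
    (hfail : ∀ i, a ≤ i → i < b → ¬ pvCond cs w i) :
    pvA_inner cs n w a = pvA_inner cs n w b := by
  obtain ⟨d, hd⟩ : ∃ d : Nat, b - a = (d : Int) := ⟨(b - a).toNat, by omega⟩
  induction d generalizing a with
  | zero =>
    have hab2 : a = b := by omega
    rw [hab2]
  | succ d ih =>
    have ha : a < b := by omega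
    rw [pvA_inner, dif_pos (hstep a le_rfl ha),
      if_neg (show ¬(PySem.List.slice cs (some a) (some (a + w)) =
        PySem.List.slice cs (some (a + w)) (some (a + w + w))) from hfail a le_rfl ha)]
    exact ih (a + 1) (by omega) (fun i h1 h2 => hstep i (by omega) h2)
      (fun i h1 h2 => hfail i (by omega) h2) (by omega)

-- If the test fails everywhere from a on, A's scan returns none.
lemma pvA_none (cs : List Char) (n w a : Int)
    (hfail : ∀ i, a ≤ i → i + w < n → ¬ pvCond cs w i) :
    pvA_inner cs n w a = none := by
  by_cases h : a + w < n
  · obtain ⟨d, hd⟩ : ∃ d : Nat, n - w - a = (d : Int) := ⟨(n - w - a).toNat, by omega⟩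
    induction d generalizing a with
    | zero => omega
    | succ d ih =>
      rw [pvA_inner, dif_pos h, if_neg (show ¬(PySem.List.slice cs (some a) (some (a + w)) =
        PySem.List.slice cs (some (a + w)) (some (a + w + w))) from hfail a le_rfl h)]
      by_cases h2 : a + 1 + w < n
      · exact ih (a + 1) (fun i h1 hi => hfail i (by omega) hi) h2 (by omega)
      · rw [pvA_inner, dif_neg h2]
  · rw [pvA_inner, dif_neg h]

-- Loop invariant for B's run-counting scan: with run the length of the maximal streak of
-- matching positions ending just before j, and no full window ending before it, B's scan
-- from (j, run) agrees with A's scan started at j - run.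
lemma pv_inner_agree (cs : List Char) (w : Int) (hw : 1 ≤ w) (j run : Int)
    (h1 : 0 ≤ run) (h2 : run < w) (h3 : run ≤ j)
    (hb : ∀ k, j - run ≤ k → k < j → PySem.List.pyGet? cs k = PySem.List.pyGet? cs (k + w))
    (hc : ∀ i, 0 ≤ i → i + w ≤ j →
        ¬ (∀ k : Int, 0 ≤ k → k < w → PySem.List.pyGet? cs (i + k) = PySem.List.pyGet? cs (i + w + k)))
    (hd : run = j ∨ ¬ PySem.List.pyGet? cs (j - run - 1) = PySem.List.pyGet? cs (j - run - 1 + w)) :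
    pvB_inner cs (cs.length : Int) w j run = pvA_inner cs (cs.length : Int) w (j - run) := by
  obtain ⟨d, hdle⟩ : ∃ d : Nat, (cs.length : Int) - w - j ≤ (d : Int) :=
    ⟨((cs.length : Int) - w - j).toNat, by omega⟩
  induction d generalizing j run with
  | zero =>
    have hjl : ¬ j < (cs.length : Int) - w := by omega
    rw [pvB_inner, dif_neg hjl]
    refine (pvA_none cs (cs.length : Int) w (j - run) ?_).symm
    intro i hi hiw hcond
    have := ((pvCond_iff cs w i hw (by omega) hiw).1 hcond).1
    omega
  | succ d ih =>
    by_cases hjl : j < (cs.length : Int) - w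
    · by_cases heq : PySem.List.pyGet? cs j = PySem.List.pyGet? cs (j + w)
      · by_cases hrw : run + 1 = w
        · rw [pvB_inner, dif_pos hjl, if_pos heq, if_pos hrw]
          have hi0w : (j - run) + w < (cs.length : Int) := by omega
          rw [pvA_inner, dif_pos hi0w]
          have hcond : pvCond cs w (j - run) := by
            refine (pvCond_iff cs w (j - run) hw (by omega) hi0w).2 ⟨by omega, ?_⟩
            intro k hk0 hkw
            by_cases hkl : (j - run) + k < j
            · have := hb ((j - run) + k) (by omega) hkl
              have e : (j - run) + w + k = ((j - run) + k) + w := by ring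
              rw [e]; exact this
            · have e1 : (j - run) + k = j := by omega
              have e2 : (j - run) + w + k = j + w := by omega
              rw [e1, e2]; exact heq
          rw [if_pos (show PySem.List.slice cs (some (j - run)) (some (j - run + w)) =
            PySem.List.slice cs (some (j - run + w)) (some (j - run + w + w)) from hcond)]
          have e1 : j - w + 1 = j - run := by omega
          have e2 : j + 1 = (j - run) + w := by omega
          rw [e1, e2]
        · rw [pvB_inner, dif_pos hjl, if_pos heq, if_neg hrw]
          have hIH := ih (j + 1) (run + 1) (by omega) (by omega) (by omega)
            (by
              intro k hk1 hk2
              by_cases hkj : k < j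
              · exact hb k (by omega) hkj
              · have e : k = j := by omega
                rw [e]; exact heq)
            (by
              intro i hi hiw2 hall
              by_cases hij : i + w ≤ j
              · exact hc i hi hij hall
              · rcases hd with hdl | hdr
                · omega
                · have hk0 : 0 ≤ j - run - 1 - i := by omega
                  have hkw : j - run - 1 - i < w := by omega
                  have := hall (j - run - 1 - i) hk0 hkw
                  have e1 : i + (j - run - 1 - i) = j - run - 1 := by ring
                  have e2 : i + w + (j - run - 1 - i) = j - run - 1 + w := by ring
                  rw [e1, e2] at this
                  exact hdr this)
            (by
              rcases hd with hdl | hdr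
              · exact Or.inl (by omega)
              · refine Or.inr ?_
                have e1 : j + 1 - (run + 1) - 1 = j - run - 1 := by ring
                rw [e1]; exact hdr)
            (by omega)
          have e : j + 1 - (run + 1) = j - run := by ring
          rw [e] at hIH
          exact hIH
      · rw [pvB_inner, dif_pos hjl, if_neg heq]
        have hIH := ih (j + 1) 0 (by omega) (by omega) (by omega)
          (by intro k hk1 hk2; omega)
          (by
            intro i hi hiw2 hall
            by_cases hij : i + w ≤ j
            · exact hc i hi hij hall
            · have := hall (w - 1) (by omega) (by omega)
              have e1 : i + (w - 1) = j := by omega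
              have e2 : i + w + (w - 1) = j + w := by omega
              rw [e1, e2] at this
              exact heq this)
          (by
            refine Or.inr ?_
            have e1 : j + 1 - 0 - 1 = j := by ring
            rw [e1]; exact heq)
          (by omega)
        have e : j + 1 - 0 = j + 1 := by ring
        rw [e] at hIH
        rw [hIH]
        refine (pvA_skip cs (cs.length : Int) w (j - run) (j + 1) (by omega)
          (by intro i hi1 hi2; omega) ?_).symm
        intro i hi1 hi2 hcond
        have hptw := ((pvCond_iff cs w i hw (by omega) (by omega)).1 hcond).2
        have := hptw (j - i) (by omega) (by omega)
        have e1 : i + (j - i) = j := by ring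
        have e2 : i + w + (j - i) = j + w := by ring
        rw [e1, e2] at this
        exact heq this
    · rw [pvB_inner, dif_neg hjl]
      refine (pvA_none cs (cs.length : Int) w (j - run) ?_).symm
      intro i hi hiw hcond
      have := ((pvCond_iff cs w i hw (by omega) hiw).1 hcond).1
      omega

-- For every width w ≥ 1, B's run scan finds exactly what A's slice scan finds.
lemma pv_inner_eq (cs : List Char) (w : Int) (hw : 1 ≤ w) :
    pvB_inner cs (cs.length : Int) w 0 0 = pvA_inner cs (cs.length : Int) w 0 := by
  have h := pv_inner_agree cs w hw 0 0 le_rfl (by omega) le_rfl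
    (by intro k hk1 hk2; omega)
    (by intro i hi hiw _; omega)
    (Or.inl rfl)
  simpa using h

-- A's outer while loop equals B's fold over range(1, maxw + 1).
lemma pv_outer_eq (cs : List Char) (maxw w : Int) (hw : 1 ≤ w) (acc : List String) :
    pvA_outer cs (cs.length : Int) maxw w acc =
      (PySem.List.pyRange w (maxw + 1) 1).foldl
        (fun acc w =>
          match pvB_inner cs (cs.length : Int) w 0 0 with
          | some m => acc ++ [String.ofList m]
          | none => acc) acc := by
  obtain ⟨d, hdle⟩ : ∃ d : Nat, maxw + 1 - w ≤ (d : Int) := ⟨(maxw + 1 - w).toNat, by omega⟩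
  induction d generalizing w acc with
  | zero =>
    have h : ¬ w ≤ maxw := by omega
    rw [pvA_outer, dif_neg h]
    rw [PySem.List.pyRange_one]
    simp [show (maxw + 1 - w).toNat = 0 from by omega]
  | succ d ih =>
    by_cases h : w ≤ maxw
    · rw [pvA_outer, dif_pos h, PySem.List.pyRange_one_cons (by omega)]
      simp only [List.foldl_cons]
      rw [pv_inner_eq cs w hw]
      cases hA : pvA_inner cs (cs.length : Int) w 0 with
      | some m => simp only [hA]; exact ih (w + 1) (by omega) (acc ++ [String.ofList m]) (by omega)
      | none => simp only [hA]; exact ih (w + 1) (by omega) acc (by omega)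
    · rw [pvA_outer, dif_neg h]
      rw [PySem.List.pyRange_one]
      simp [show (maxw + 1 - w).toNat = 0 from by omega]

-- ===== VERDICT (by name: the statement is the Claim_ definition above) =====
theorem find_recurring_sequences_spec : Claim_equal_find_recurring_sequences := by
  intro s _
  unfold Spec_find_recurring_sequences find_recurring_sequences find_recurring_sequences_alt
  exact pv_outer_eq s.toList (PySem.Int.floordiv ((s.toList.length : Nat) : Int) 2) 1 le_rfl []
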